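-- pv_equiv track=rewrite | github.com/cyruscook/bankholiday_retriever | src/notice_parser.py | read_country_list
-- ===== SOURCE A (Python) =====
-- def read_country_list(string: str) -> str:
--     while True:
--         if string.startswith("england"):
--             string = string[len("england") :]
--         elif string.startswith(", england"):
--             string = string[len(", england") :]
--         elif string.startswith(" and england"):
--             string = string[len(" and england") :]
--         elif string.startswith(", and england"):
--             string = string[len(", and england") :]
--         else:
--             break
--     return string
-- ===== SOURCE B (Python) =====
-- import re
--
-- # Anchored regex matching the maximal leading run of the four prefixes;
-- # the alternatives are mutually exclusive at any position, so the greedy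
-- # match equals the original greedy loop.
-- _RUN = re.compile(r"(?:england|, england| and england|, and england)+")
--
--
-- def read_country_list(string: str) -> str:
--     m = _RUN.match(string)
--     return string[m.end():] if m else string
-- ===== Notes on version B (the rewrite author's own statement) =====
-- stated objective: idiomatic
-- what changed: B replaces the hand-written while-loop that repeatedly re-slices the string with a single anchored regex matching the maximal leading run of the four prefixes, slicing once at the match end.
import Mathlib
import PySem

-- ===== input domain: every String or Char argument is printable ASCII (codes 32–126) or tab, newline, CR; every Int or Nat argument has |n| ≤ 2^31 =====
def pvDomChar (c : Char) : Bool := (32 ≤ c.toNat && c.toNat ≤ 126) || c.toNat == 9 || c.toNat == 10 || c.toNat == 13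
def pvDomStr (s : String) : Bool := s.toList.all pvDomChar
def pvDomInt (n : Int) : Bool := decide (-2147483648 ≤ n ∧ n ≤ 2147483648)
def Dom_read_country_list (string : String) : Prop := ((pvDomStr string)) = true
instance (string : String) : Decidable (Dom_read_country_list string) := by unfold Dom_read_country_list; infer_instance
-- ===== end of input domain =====

-- B replaces A's prefix-stripping while-loop by one anchored regex match of the
-- maximal leading run of the four prefixes and a single slice (objective:
-- idiomatic; the return value is proved identical).

-- ===== PORT A =====
-- A's while-loop: check the four prefixes in A's order, slice off the matched one, repeat.
def stripA (l : List Char) : List Char :=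
  if PySem.Chars.startswith l ("england".toList) then
    stripA (PySem.Chars.slice l (some 7) none)
  else if PySem.Chars.startswith l (", england".toList) then
    stripA (PySem.Chars.slice l (some 9) none)
  else if PySem.Chars.startswith l (" and england".toList) then
    stripA (PySem.Chars.slice l (some 12) none)
  else if PySem.Chars.startswith l (", and england".toList) then
    stripA (PySem.Chars.slice l (some 13) none)
  else l
termination_by l.length
decreasing_by
  all_goals
    rename_i h
    rw [PySem.Chars.startswith_iff] at h
    have hl := h.length_le
    simp only [PySem.Chars.slice_eq_listSlice]
    simp [PySem.List.slice_from] at *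
    omega

def read_country_list (string : String) : String :=
  String.ofList (stripA string.toList)

-- ===== PORT B =====
-- The regex's alternatives, in the regex's left-to-right order.
def pvAlts : List (List Char) :=
  ["england".toList, ", england".toList, " and england".toList, ", and england".toList]

-- one step of the regex engine: try the alternatives left to right at position i
-- (a literal alternative matches at i iff it is a prefix of the suffix at i).
def matchAlt (l : List Char) (i : Nat) : List (List Char) → Option Nat
  | [] => none
  | p :: ps => if PySem.Chars.startswith (l.drop i) p then some p.length else matchAlt l i ps

-- termination fact for matchEnd, cited by its decreasing_by
theorem matchAlt_bounds (l : List Char) (i k : Nat)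
    (h : matchAlt l i pvAlts = some k) : 0 < k ∧ i + k ≤ l.length := by
  simp only [pvAlts, matchAlt] at h
  split_ifs at h with h1 h2 h3 h4 <;>
  · obtain rfl := Option.some.inj h
    first
      | (rw [PySem.Chars.startswith_iff] at h1; have hl := h1.length_le; simp at hl ⊢; omega)
      | (rw [PySem.Chars.startswith_iff] at h2; have hl := h2.length_le; simp at hl ⊢; omega)
      | (rw [PySem.Chars.startswith_iff] at h3; have hl := h3.length_le; simp at hl ⊢; omega)
      | (rw [PySem.Chars.startswith_iff] at h4; have hl := h4.length_le; simp at hl ⊢; omega)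

-- greedy '+' with nothing after it: repeat the alternation while it matches
def matchEnd (l : List Char) (i : Nat) : Nat :=
  match h : matchAlt l i pvAlts with
  | some k => matchEnd l (i + k)
  | none => i
termination_by l.length - i
decreasing_by
  have := matchAlt_bounds l i k h
  omega

-- `_RUN.match(string)`: None iff not even one repetition matches at position 0
def pyRegexRunMatchEnd? (l : List Char) : Option Nat :=
  match matchAlt l 0 pvAlts with
  | some k => some (matchEnd l k)
  | none => none

-- `return string[m.end():] if m else string`
def read_country_list_alt (string : String) : String :=
  match pyRegexRunMatchEnd? string.toList with
  | some e => String.ofList (PySem.Chars.slice string.toList (some ((e : Nat) : Int)) none)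
  | none => string

-- ===== PRECONDITION & SPEC =====
def Spec_read_country_list (string : String) (out : String) : Prop := out = read_country_list_alt string
instance (string : String) (out : String) : Decidable (Spec_read_country_list string out) := by unfold Spec_read_country_list; infer_instance

-- ===== CLAIM (what is proved, stated in full; the proofs are below) =====
def Claim_equal_read_country_list : Prop := ∀ (string : String), Dom_read_country_list string → Spec_read_country_list string (read_country_list string)

-- ===== LEMMAS AND PROOFS =====

theorem stripA_no_match (m : List Char)
    (h1 : ¬ PySem.Chars.startswith m ("england".toList))
    (h2 : ¬ PySem.Chars.startswith m (", england".toList))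
    (h3 : ¬ PySem.Chars.startswith m (" and england".toList))
    (h4 : ¬ PySem.Chars.startswith m (", and england".toList)) :
    stripA m = m := by
  rw [stripA]
  rw [if_neg h1, if_neg h2, if_neg h3, if_neg h4]

theorem slice_from_drop (m : List Char) (k : Nat) :
    PySem.Chars.slice m (some ((k : Nat) : Int)) none = m.drop k := by
  simp [PySem.List.slice_from]

-- key invariant: A's residual string at suffix i equals the suffix at the match end
theorem key : ∀ (n : Nat) (l : List Char) (i : Nat), l.length - i ≤ n →
    stripA (l.drop i) = l.drop (matchEnd l i) := by
  intro n
  induction n with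
  | zero =>
    intro l i hle
    have hnil : l.drop i = [] := by
      rw [List.drop_eq_nil_iff]; omega
    rw [matchEnd]
    cases hm : matchAlt l i pvAlts with
    | some k =>
      have := matchAlt_bounds l i k hm
      omega
    | none =>
      rw [hnil]
      exact stripA_no_match [] (by decide) (by decide) (by decide) (by decide)
  | succ n ih =>
    intro l i hle
    rw [matchEnd]
    cases hm : matchAlt l i pvAlts with
    | none =>
      simp only [pvAlts, matchAlt] at hm
      split_ifs at hm with h1 h2 h3 h4
      exact stripA_no_match _ h1 h2 h3 h4
    | some k =>
      have hb := matchAlt_bounds l i k hm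
      simp only [pvAlts, matchAlt] at hm
      -- the regex tries the alternatives in the same order as A's branches
      split_ifs at hm with h1 h2 h3 h4
      · obtain rfl := Option.some.inj hm
        rw [stripA, if_pos h1]
        have := ih l (i + "england".toList.length) (by simp at hb ⊢; omega)
        simp [PySem.List.slice_from, List.drop_drop] at this ⊢
        exact this
      · obtain rfl := Option.some.inj hm
        rw [stripA, if_neg h1, if_pos h2]
        have := ih l (i + ", england".toList.length) (by simp at hb ⊢; omega)
        simp [PySem.List.slice_from, List.drop_drop] at this ⊢
        exact this
      · obtain rfl := Option.some.inj hm
        rw [stripA, if_neg h1, if_neg h2, if_pos h3]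
        have := ih l (i + " and england".toList.length) (by simp at hb ⊢; omega)
        simp [PySem.List.slice_from, List.drop_drop] at this ⊢
        exact this
      · obtain rfl := Option.some.inj hm
        rw [stripA, if_neg h1, if_neg h2, if_neg h3, if_pos h4]
        have := ih l (i + ", and england".toList.length) (by simp at hb ⊢; omega)
        simp [PySem.List.slice_from, List.drop_drop] at this ⊢
        exact this

-- ===== VERDICT (by name: the statement is the Claim_ definition above) =====
theorem read_country_list_spec : Claim_equal_read_country_list := by
  intro s _
  unfold Spec_read_country_list read_country_list read_country_list_alt pyRegexRunMatchEnd?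
  cases hm : matchAlt s.toList 0 pvAlts with
  | none =>
    simp only [pvAlts, matchAlt] at hm
    split_ifs at hm with h1 h2 h3 h4
    simp only [List.drop_zero] at h1 h2 h3 h4
    rw [stripA_no_match _ h1 h2 h3 h4, String.ofList_toList]
  | some k =>
    dsimp only
    rw [slice_from_drop]
    have hk := key s.toList.length s.toList 0 (by omega)
    simp only [List.drop_zero] at hk
    rw [hk, matchEnd, hm]
    simp
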